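-- pv_equiv track=rewrite | github.com/homerxie/ExcelOutlinerAnalysis | src/excel_data_analysis/io.py | _combine_headers
-- ===== SOURCE A (Python) =====
-- def _combine_headers(measurement_headers: list[str], row_headers: list[str]) -> list[str]:
--     size = max(len(measurement_headers), len(row_headers))
--     headers: list[str] = []
--     used: dict[str, int] = {}
--     for index in range(size):
--         header = ""
--         if index < len(row_headers) and row_headers[index]:
--             header = row_headers[index]
--         elif index < len(measurement_headers) and measurement_headers[index]:
--             header = measurement_headers[index]
--         if header and header in used:
--             used[header] += 1
--             header = f"{header}__{used[header]}"
--         elif header: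
--             used[header] = 1
--         headers.append(header)
--     return headers
-- ===== SOURCE B (Python) =====
-- def _combine_headers(measurement_headers: list[str], row_headers: list[str]) -> list[str]:
--     # Stage 1: merge the two header lists positionally (row wins when truthy).
--     size = max(len(measurement_headers), len(row_headers))
--     merged = []
--     for i in range(size):
--         if i < len(row_headers) and row_headers[i]:
--             merged.append(row_headers[i])
--         elif i < len(measurement_headers) and measurement_headers[i]:
--             merged.append(measurement_headers[i])
--         else:
--             merged.append("")
--     # Stage 2: stateless disambiguation — no counting dict; the ordinal of each
--     # occurrence is a closed form: how often the header appears in merged[:i+1].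
--     result = []
--     for i, h in enumerate(merged):
--         if not h:
--             result.append("")
--         else:
--             c = merged[:i + 1].count(h)
--             result.append(h if c == 1 else f"{h}__{c}")
--     return result
-- ===== Notes on version B (the rewrite author's own statement) =====
-- stated objective: alternative
-- what changed: A disambiguates duplicates by threading a mutable 'used' counting dict through one fused loop; B first merges the two lists positionally and then suffixes each header statelessly, computing its ordinal as the closed-form prefix count merged[:i+1].count(h) with no dict or running state at all (O(n^2) scan instead of O(n) dict).
import Mathlib
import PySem

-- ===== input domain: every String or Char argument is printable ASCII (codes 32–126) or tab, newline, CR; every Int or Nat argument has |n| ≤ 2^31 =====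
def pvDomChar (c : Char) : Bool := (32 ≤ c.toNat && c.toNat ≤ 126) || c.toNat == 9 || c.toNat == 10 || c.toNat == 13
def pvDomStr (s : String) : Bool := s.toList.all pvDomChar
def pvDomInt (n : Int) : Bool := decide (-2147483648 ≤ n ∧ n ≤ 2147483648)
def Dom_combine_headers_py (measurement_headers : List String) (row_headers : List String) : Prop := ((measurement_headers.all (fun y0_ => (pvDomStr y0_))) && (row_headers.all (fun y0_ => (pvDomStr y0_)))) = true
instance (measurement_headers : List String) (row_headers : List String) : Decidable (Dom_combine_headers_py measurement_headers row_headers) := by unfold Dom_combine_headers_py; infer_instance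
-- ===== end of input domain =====

-- B replaces A's running 'used' counting dict with a stateless per-position closed form: each nonempty header's ordinal is the prefix count merged[:i+1].count(h) (alternative algorithm, O(n^2) instead of O(n)).


-- ===== PORT A =====
-- one fused loop over range(size): pick the header, then suffix it against the 'used' dict
def combine_headers_py (measurement_headers : List String) (row_headers : List String) : List String :=
  let size : Int := max (PySem.List.len measurement_headers) (PySem.List.len row_headers)
  ((PySem.List.pyRange 0 size 1).foldl
    (fun (st : List String × PySem.Dict String Int) index =>
      let header : String :=
        if index < PySem.List.len row_headers ∧ PySem.List.pyGetD row_headers index "" ≠ "" then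
          PySem.List.pyGetD row_headers index ""
        else if index < PySem.List.len measurement_headers ∧ PySem.List.pyGetD measurement_headers index "" ≠ "" then
          PySem.List.pyGetD measurement_headers index ""
        else ""
      if header ≠ "" ∧ st.2.contains header then
        -- used[header] += 1  (key present by the guard, so the read is getD)
        let used' := st.2.insert header (st.2.getD header 0 + 1)
        (st.1 ++ [header ++ "__" ++ PySem.Int.toStr (used'.getD header 0)], used')
      else if header ≠ "" then
        (st.1 ++ [header], st.2.insert header 1)
      else
        (st.1 ++ [header], st.2))
    ([], PySem.Dict.empty)).1

-- ===== PORT B =====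
def combine_headers_py_alt (measurement_headers : List String) (row_headers : List String) : List String :=
  let size : Int := max (PySem.List.len measurement_headers) (PySem.List.len row_headers)
  -- stage 1: merge the two lists positionally (row wins when truthy)
  let merged : List String := (PySem.List.pyRange 0 size 1).foldl
    (fun acc i =>
      if i < PySem.List.len row_headers ∧ PySem.List.pyGetD row_headers i "" ≠ "" then
        acc ++ [PySem.List.pyGetD row_headers i ""]
      else if i < PySem.List.len measurement_headers ∧ PySem.List.pyGetD measurement_headers i "" ≠ "" then
        acc ++ [PySem.List.pyGetD measurement_headers i ""]
      else acc ++ [""]) []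
  -- stage 2: stateless disambiguation — c = merged[:i+1].count(h), no dict
  (PySem.List.enumerate merged 0).foldl
    (fun res p =>
      if p.2 = "" then res ++ [""]
      else
        let c : Int := PySem.List.count (PySem.List.slice merged none (some (p.1 + 1))) p.2
        res ++ [if c == 1 then p.2 else p.2 ++ "__" ++ PySem.Int.toStr c]) []

-- ===== PRECONDITION & SPEC =====
def Spec_combine_headers_py (measurement_headers : List String) (row_headers : List String) (out : List String) : Prop := out = combine_headers_py_alt measurement_headers row_headers
instance (measurement_headers : List String) (row_headers : List String) (out : List String) : Decidable (Spec_combine_headers_py measurement_headers row_headers out) := by unfold Spec_combine_headers_py; infer_instance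

-- ===== CLAIM (what is proved, stated in full; the proofs are below) =====
def Claim_equal_combine_headers_py : Prop := ∀ (measurement_headers : List String) (row_headers : List String), Dom_combine_headers_py measurement_headers row_headers → Spec_combine_headers_py measurement_headers row_headers (combine_headers_py measurement_headers row_headers)

-- ===== LEMMAS AND PROOFS =====

-- the positional selection both programs perform
def pvSelect (measurement_headers : List String) (row_headers : List String) (i : Int) : String :=
  if i < PySem.List.len row_headers ∧ PySem.List.pyGetD row_headers i "" ≠ "" then
    PySem.List.pyGetD row_headers i ""
  else if i < PySem.List.len measurement_headers ∧ PySem.List.pyGetD measurement_headers i "" ≠ "" then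
    PySem.List.pyGetD measurement_headers i ""
  else ""

-- A's loop body on the selected value
def pvStepD (st : List String × PySem.Dict String Int) (h : String) : List String × PySem.Dict String Int :=
  if h ≠ "" ∧ st.2.contains h then
    let used' := st.2.insert h (st.2.getD h 0 + 1)
    (st.1 ++ [h ++ "__" ++ PySem.Int.toStr (used'.getD h 0)], used')
  else if h ≠ "" then
    (st.1 ++ [h], st.2.insert h 1)
  else
    (st.1 ++ [h], st.2)

-- the three shapes of A's step
lemma pvStepD_empty (acc : List String) (d : PySem.Dict String Int) :
    pvStepD (acc, d) "" = (acc ++ [""], d) := by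
  simp [pvStepD]

lemma pvStepD_hit (acc : List String) (d : PySem.Dict String Int) (h : String)
    (hne : h ≠ "") (hc : d.contains h = true) :
    pvStepD (acc, d) h = (acc ++ [h ++ "__" ++ PySem.Int.toStr (d.getD h 0 + 1)], d.insert h (d.getD h 0 + 1)) := by
  simp only [pvStepD, hne, hc, ne_eq, not_false_eq_true, and_self, if_pos]
  rw [PySem.Dict.getD_insert_self]

lemma pvStepD_miss (acc : List String) (d : PySem.Dict String Int) (h : String)
    (hne : h ≠ "") (hc : d.contains h = false) :
    pvStepD (acc, d) h = (acc ++ [h], d.insert h 1) := by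
  simp [pvStepD, hne, hc]

-- the closed-form element: ordinal via prefix counts (pref = already processed, rest = remaining)
def pvElem (pref rest : List String) (j : Nat) (h : String) : String :=
  if h = "" then ""
  else if (pref.count h : Int) + ((rest.take (j+1)).count h : Int) = 1 then h
  else h ++ "__" ++ PySem.Int.toStr ((pref.count h : Int) + ((rest.take (j+1)).count h : Int))

-- invariant: the dict records exactly the counts of the processed prefix
def pvInv (pref : List String) (d : PySem.Dict String Int) : Prop :=
  ∀ k, k ≠ "" → d.getD k 0 = (pref.count k : Int) ∧ d.contains k = decide (pref.count k ≠ 0)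

lemma pv_count_append (pref : List String) (h k : String) :
    (pref ++ [h]).count k = pref.count k + (if h = k then 1 else 0) := by
  by_cases hhk : h = k <;> simp [List.count_append, hhk]

lemma pvInv_step (acc pref : List String) (d : PySem.Dict String Int) (hI : pvInv pref d) (h : String) :
    pvInv (pref ++ [h]) (pvStepD (acc, d) h).2 := by
  intro k hk
  by_cases hne : h = ""
  · subst hne
    rw [pvStepD_empty, pv_count_append]
    simp only [if_neg (Ne.symm hk), Nat.add_zero]
    exact hI k hk
  · have hcnt : (pref ++ [h]).count k = pref.count k + (if h = k then 1 else 0) := pv_count_append pref h k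
    by_cases hc : d.contains h = true
    · rw [pvStepD_hit acc d h hne hc]
      constructor
      · rw [PySem.Dict.getD_insert, hcnt, (hI h hne).1]
        by_cases hkh : k = h
        · subst hkh
          simp only [if_pos rfl]
          push_cast
          ring
        · simp only [if_neg hkh, if_neg (fun e => hkh (Eq.symm e)), Nat.add_zero]
          exact (hI k hk).1
      · rw [PySem.Dict.contains_insert, hcnt]
        by_cases hkh : k = h
        · subst hkh
          simp
        · have hbeq : (k == h) = false := by simpa using hkh
          simp only [hbeq, Bool.false_or, if_neg (fun e => hkh (Eq.symm e)), Nat.add_zero]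
          exact (hI k hk).2
    · have hc' : d.contains h = false := by simpa using hc
      have h0 : pref.count h = 0 := by
        have h2 := (hI h hne).2
        rw [hc'] at h2
        have h3 := h2.symm
        simpa using h3
      rw [pvStepD_miss acc d h hne hc']
      constructor
      · rw [PySem.Dict.getD_insert, hcnt]
        by_cases hkh : k = h
        · subst hkh
          simp [h0]
        · simp only [if_neg hkh, if_neg (fun e => hkh (Eq.symm e)), Nat.add_zero]
          exact (hI k hk).1
      · rw [PySem.Dict.contains_insert, hcnt]
        by_cases hkh : k = h
        · subst hkh
          simp
        · have hbeq : (k == h) = false := by simpa using hkh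
          simp only [hbeq, Bool.false_or, if_neg (fun e => hkh (Eq.symm e)), Nat.add_zero]
          exact (hI k hk).2

lemma pv_take_succ_count (h k : String) (t : List String) (j : Nat) :
    ((h :: t).take (j + 1 + 1)).count k = (if h = k then 1 else 0) + (t.take (j + 1)).count k := by
  rw [List.take_succ_cons]
  by_cases hhk : h = k <;> simp [List.count_cons, hhk, Nat.add_comm]

lemma pvElem_shift (pref : List String) (h : String) (t : List String) :
    (fun (i : Nat) => pvElem pref (h :: t) (i + 1)) = pvElem (pref ++ [h]) t := by
  funext j h'
  unfold pvElem
  by_cases hne' : h' = ""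
  · rw [if_pos hne', if_pos hne']
  · simp only [if_neg hne']
    rw [pv_take_succ_count h h' t j, pv_count_append pref h h']
    have hceq : (pref.count h' : Int) + (((if h = h' then 1 else 0) + (t.take (j+1)).count h' : Nat) : Int)
        = ((pref.count h' + (if h = h' then 1 else 0) : Nat) : Int) + ((t.take (j+1)).count h' : Int) := by
      by_cases hh : h = h'
      · rw [if_pos hh]
        push_cast
        ring
      · rw [if_neg hh]
        push_cast
        ring
    rw [hceq]

lemma pv_foldD (rest : List String) : ∀ (pref acc : List String) (d : PySem.Dict String Int),
    pvInv pref d →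
    (rest.foldl pvStepD (acc, d)).1 = acc ++ rest.mapIdx (pvElem pref rest) := by
  induction rest with
  | nil => intro pref acc d _; simp
  | cons h t ih =>
      intro pref acc d hI
      have htake : ((h :: t).take (0+1)).count h = 1 := by simp
      have hstep : pvStepD (acc, d) h = ((acc ++ [pvElem pref (h :: t) 0 h]), (pvStepD (acc, d) h).2) := by
        by_cases hne : h = ""
        · subst hne
          have hKey : pvElem pref ("" :: t) 0 "" = "" := by
            unfold pvElem
            rw [if_pos rfl]
          rw [pvStepD_empty, hKey]
        · by_cases hc : d.contains h = true
          · have hcnt : pref.count h ≠ 0 := by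
              have h2 := (hI h hne).2
              rw [hc] at h2
              have h3 := h2.symm
              simpa using h3
            have hn : 0 < pref.count h := Nat.pos_of_ne_zero hcnt
            have hKey : pvElem pref (h :: t) 0 h = h ++ "__" ++ PySem.Int.toStr ((pref.count h : Int) + 1) := by
              unfold pvElem
              rw [if_neg hne, htake, Nat.cast_one, if_neg (by omega : ¬((pref.count h : Int) + 1 = 1))]
            rw [pvStepD_hit acc d h hne hc, hKey, (hI h hne).1]
          · have hc' : d.contains h = false := by simpa using hc
            have hKey : pvElem pref (h :: t) 0 h = h := by
              have h0 : pref.count h = 0 := by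
                have h2 := (hI h hne).2
                rw [hc'] at h2
                have h3 := h2.symm
                simpa using h3
              unfold pvElem
              rw [if_neg hne, htake, Nat.cast_one, h0, Nat.cast_zero, if_pos (by norm_num : (0:Int) + 1 = 1)]
            rw [pvStepD_miss acc d h hne hc', hKey]
      have hI' : pvInv (pref ++ [h]) (pvStepD (acc, d) h).2 := pvInv_step acc pref d hI h
      calc ((h :: t).foldl pvStepD (acc, d)).1
          = (t.foldl pvStepD (pvStepD (acc, d) h)).1 := by rw [List.foldl_cons]
        _ = (t.foldl pvStepD ((acc ++ [pvElem pref (h :: t) 0 h]), (pvStepD (acc, d) h).2)).1 := by rw [← hstep]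
        _ = (acc ++ [pvElem pref (h :: t) 0 h]) ++ t.mapIdx (pvElem (pref ++ [h]) t) := ih (pref ++ [h]) _ _ hI'
        _ = acc ++ (h :: t).mapIdx (pvElem pref (h :: t)) := by
            rw [List.mapIdx_cons, pvElem_shift pref h t]
            simp

-- B's per-element closed form (take index in Nat) and B's loop body, named for the proofs
def pvF (merged : List String) (n : Nat) (h : String) : String :=
  if h = "" then ""
  else if ((merged.take n).count h : Int) == 1 then h
  else h ++ "__" ++ PySem.Int.toStr ((merged.take n).count h : Int)

def pvStepB (merged res : List String) (p : Int × String) : List String :=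
  if p.2 = "" then res ++ [""]
  else
    let c : Int := PySem.List.count (PySem.List.slice merged none (some (p.1 + 1))) p.2
    res ++ [if c == 1 then p.2 else p.2 ++ "__" ++ PySem.Int.toStr c]

lemma pvStepB_empty (merged res : List String) (i : Int) :
    pvStepB merged res (i, "") = res ++ [""] := by
  simp [pvStepB]

lemma pvStepB_ne (merged res : List String) (i : Int) (y : String) (hy : y ≠ "") :
    pvStepB merged res (i, y) = res ++
      [if (PySem.List.count (PySem.List.slice merged none (some (i + 1))) y : Int) == 1 then y
       else y ++ "__" ++ PySem.Int.toStr (PySem.List.count (PySem.List.slice merged none (some (i + 1))) y : Int)] := by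
  simp only [pvStepB]
  rw [if_neg hy]

-- B's second stage equals the closed form (index bookkeeping over enumerate)
lemma pv_foldB (merged : List String) (ys : List String) : ∀ (s : Nat) (acc : List String),
    (PySem.List.enumerate ys ((s : Nat) : Int)).foldl (pvStepB merged) acc
    = acc ++ ys.mapIdx (fun j h => pvF merged (s + j + 1) h) := by
  induction ys with
  | nil => intro s acc; simp [PySem.List.enumerate_nil]
  | cons y t ih =>
      intro s acc
      rw [PySem.List.enumerate_cons, List.foldl_cons]
      have hcast : ((s : Nat) : Int) + 1 = (((s + 1 : Nat)) : Int) := by push_cast; ring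
      have hshift : (fun (j : Nat) (h : String) => pvF merged (s + 1 + j + 1) h)
          = (fun (j : Nat) (h : String) => pvF merged (s + (j + 1) + 1) h) := by
        funext j h
        have hidx : s + 1 + j + 1 = s + (j + 1) + 1 := by omega
        rw [hidx]
      by_cases hy : y = ""
      · subst hy
        rw [pvStepB_empty, hcast, ih (s + 1) (acc ++ [""])]
        simp only [List.mapIdx_cons]
        rw [← hshift]
        simp [pvF]
      · rw [pvStepB_ne merged acc _ y hy]
        have hc : PySem.List.count (PySem.List.slice merged none (some (((s : Nat) : Int) + 1))) y
            = (merged.take (s + 1)).count y := by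
          rw [hcast, PySem.List.slice_to_natCast, PySem.List.count_eq]
        rw [hc, hcast, ih (s + 1)]
        simp only [List.mapIdx_cons]
        rw [← hshift]
        simp [pvF, hy]

-- B's stage-1 merge loop, named so the defeq bridge hB below can mention it twice
def pvMergeB (m r : List String) : List String :=
  (PySem.List.pyRange 0 (max (PySem.List.len m) (PySem.List.len r)) 1).foldl
    (fun acc i =>
      if i < PySem.List.len r ∧ PySem.List.pyGetD r i "" ≠ "" then
        acc ++ [PySem.List.pyGetD r i ""]
      else if i < PySem.List.len m ∧ PySem.List.pyGetD m i "" ≠ "" then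
        acc ++ [PySem.List.pyGetD m i ""]
      else acc ++ [""]) []

lemma pvMergeB_eq_map (m r : List String) :
    pvMergeB m r = (PySem.List.pyRange 0 (max (PySem.List.len m) (PySem.List.len r)) 1).map (pvSelect m r) := by
  unfold pvMergeB
  have hb : (fun (acc : List String) (i : Int) =>
      if i < PySem.List.len r ∧ PySem.List.pyGetD r i "" ≠ "" then
        acc ++ [PySem.List.pyGetD r i ""]
      else if i < PySem.List.len m ∧ PySem.List.pyGetD m i "" ≠ "" then
        acc ++ [PySem.List.pyGetD m i ""]
      else acc ++ [""]) = (fun acc i => acc ++ [pvSelect m r i]) := by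
    funext acc i
    unfold pvSelect
    split_ifs <;> rfl
  rw [hb, PySem.List.foldl_append_singleton_eq_map, List.nil_append]

lemma pv_main (m r : List String) : combine_headers_py m r = combine_headers_py_alt m r := by
  -- defeq bridges past the ports' let-bindings
  have hA : combine_headers_py m r =
      ((PySem.List.pyRange 0 (max (PySem.List.len m) (PySem.List.len r)) 1).foldl
        (fun (st : List String × PySem.Dict String Int) i => pvStepD st (pvSelect m r i))
        ([], PySem.Dict.empty)).1 := rfl
  have hB : combine_headers_py_alt m r =
      (PySem.List.enumerate (pvMergeB m r) (((0 : Nat) : Int))).foldl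
        (pvStepB (pvMergeB m r)) [] := rfl
  rw [hA, hB, pvMergeB_eq_map]
  set merged : List String :=
    (PySem.List.pyRange 0 (max (PySem.List.len m) (PySem.List.len r)) 1).map (pvSelect m r) with hm
  have hInv0 : pvInv [] PySem.Dict.empty := by
    intro k _
    constructor
    · simp [PySem.Dict.getD_empty]
    · simp [PySem.Dict.contains_empty]
  rw [← List.foldl_map, ← hm, pv_foldD merged [] [] PySem.Dict.empty hInv0,
      pv_foldB merged merged 0 []]
  simp only [List.nil_append]
  have hfun : pvElem [] merged = fun (j : Nat) (h : String) => pvF merged (0 + j + 1) h := by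
    funext j h
    unfold pvElem pvF
    by_cases hne : h = ""
    · rw [if_pos hne, if_pos hne]
    · rw [if_neg hne, if_neg hne]
      have hz : (0 : Nat) + j + 1 = j + 1 := by omega
      rw [hz]
      have hc0 : (([] : List String).count h : Int) = 0 := by simp
      rw [hc0, zero_add]
      by_cases hone : ((merged.take (j + 1)).count h : Int) = 1
      · rw [if_pos hone, if_pos (beq_iff_eq.mpr hone)]
      · rw [if_neg hone, if_neg (fun hbe => hone (beq_iff_eq.mp hbe))]
  rw [hfun]

-- ===== VERDICT (by name: the statement is the Claim_ definition above) =====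
theorem combine_headers_py_spec : Claim_equal_combine_headers_py := by
  intro m r _
  unfold Spec_combine_headers_py
  exact pv_main m r
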